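-- pv_equiv track=rewrite | github.com/adamcheaib/static_site_generator | src/block_markdown.py | identify_block_type
-- ===== SOURCE A (Python) =====
-- def identify_block_type(block_line):
--     characters = [
--         "# ",
--         "## ",
--         "### ",
--         "#### ",
--         "##### ",
--         "###### ",
--         "```",
--         "> ",
--         "* ",
--         "- ",
--         "1. "
--     ]
--
--     type = "paragraph"
--     for i in range(0, len(characters)):
--         character = characters[i]
--         if block_line.startswith(character):
--             if (character == "# "
--                     or character == "## "
--                     or character == "### "
--                     or character == "#### "
--                     or character == "##### "
--                     or character == "###### "):
--                 type = f"heading {i + 1}"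
--
--             if character == "```":
--                 type = "code"
--
--             if character == "> ":
--                 type = "quote"
--
--             if character == "* " or character == "- ":
--                 type = "unordered_list"
--
--             if character == "1. ":
--                 type = "ordered_list"
--
--     return type
-- ===== SOURCE B (Python) =====
-- def identify_block_type(block_line):
--     n = len(block_line) - len(block_line.lstrip('#'))
--     if 1 <= n <= 6 and n < len(block_line) and block_line[n] == ' ':
--         return f"heading {n}"
--     if block_line.startswith("```"):
--         return "code"
--     if block_line.startswith("> "):
--         return "quote"
--     if block_line.startswith("* ") or block_line.startswith("- "):
--         return "unordered_list"
--     if block_line.startswith("1. "):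
--         return "ordered_list"
--     return "paragraph"
-- ===== Notes on version B (the rewrite author's own statement) =====
-- stated objective: simpler
-- what changed: A folds over a list of eleven literal prefixes keeping the last match; B counts the leading hash run arithmetically to decide headings and uses an early-return chain of five startswith tests for the other block types.
import Mathlib
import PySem

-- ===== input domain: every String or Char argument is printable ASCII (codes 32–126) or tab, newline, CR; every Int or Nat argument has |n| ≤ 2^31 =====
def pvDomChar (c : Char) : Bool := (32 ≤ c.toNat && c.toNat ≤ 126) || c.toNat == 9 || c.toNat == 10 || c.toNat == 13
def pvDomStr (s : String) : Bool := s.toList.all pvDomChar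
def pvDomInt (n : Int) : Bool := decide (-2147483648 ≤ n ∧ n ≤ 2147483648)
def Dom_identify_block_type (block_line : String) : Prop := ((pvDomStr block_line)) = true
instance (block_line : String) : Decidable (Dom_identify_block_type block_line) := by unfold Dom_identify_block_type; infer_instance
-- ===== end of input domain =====

-- B replaces A's scan over eleven literal prefixes by counting the leading hash run for headings plus five early-return prefix tests (simpler decomposition, same results).


-- ===== PORT A =====
def identify_block_type (block_line : String) : String :=
  let characters : List String :=
    ["# ", "## ", "### ", "#### ", "##### ", "###### ", "```", "> ", "* ", "- ", "1. "]
  (PySem.List.pyRange 0 (characters.length : Int) 1).foldl (fun type i =>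
    let character := PySem.List.pyGetD characters i ""
    if PySem.Str.startswith block_line character then
      let type := if character == "# " || character == "## " || character == "### "
          || character == "#### " || character == "##### " || character == "###### "
        then "heading " ++ PySem.Int.toStr (i + 1) else type
      let type := if character == "```" then "code" else type
      let type := if character == "> " then "quote" else type
      let type := if character == "* " || character == "- " then "unordered_list" else type
      let type := if character == "1. " then "ordered_list" else type
      type
    else type) "paragraph"

-- ===== PORT B =====
def identify_block_type_alt (block_line : String) : String :=
  -- block_line.lstrip('#') is ported by hand as dropWhile (· == '#') on the code points
  -- (exact: that lstrip removes precisely the maximal leading run of hash characters)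
  let n : Int := PySem.Str.len block_line - ((block_line.toList.dropWhile (· == '#')).length : Int)
  if (1 ≤ n && n ≤ 6) && (n < PySem.Str.len block_line && PySem.Str.pyGet? block_line n == some ' ')
  then "heading " ++ PySem.Int.toStr n
  else if PySem.Str.startswith block_line "```" then "code"
  else if PySem.Str.startswith block_line "> " then "quote"
  else if PySem.Str.startswith block_line "* " || PySem.Str.startswith block_line "- " then "unordered_list"
  else if PySem.Str.startswith block_line "1. " then "ordered_list"
  else "paragraph"

-- ===== PRECONDITION & SPEC =====
def Spec_identify_block_type (block_line : String) (out : String) : Prop := out = identify_block_type_alt block_line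
instance (block_line : String) (out : String) : Decidable (Spec_identify_block_type block_line out) := by unfold Spec_identify_block_type; infer_instance

-- ===== CLAIM (what is proved, stated in full; the proofs are below) =====
def Claim_equal_identify_block_type : Prop := ∀ (block_line : String), Dom_identify_block_type block_line → Spec_identify_block_type block_line (identify_block_type block_line)

-- ===== LEMMAS AND PROOFS =====

-- A's loop, unrolled: the last matching prefix wins, so the chain reads back-to-front.
def pvA (cs : List Char) : String :=
  if ['1', '.', ' '].isPrefixOf cs then "ordered_list"
  else if ['-', ' '].isPrefixOf cs then "unordered_list"
  else if ['*', ' '].isPrefixOf cs then "unordered_list"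
  else if ['>', ' '].isPrefixOf cs then "quote"
  else if ['`', '`', '`'].isPrefixOf cs then "code"
  else if ['#', '#', '#', '#', '#', '#', ' '].isPrefixOf cs then "heading 6"
  else if ['#', '#', '#', '#', '#', ' '].isPrefixOf cs then "heading 5"
  else if ['#', '#', '#', '#', ' '].isPrefixOf cs then "heading 4"
  else if ['#', '#', '#', ' '].isPrefixOf cs then "heading 3"
  else if ['#', '#', ' '].isPrefixOf cs then "heading 2"
  else if ['#', ' '].isPrefixOf cs then "heading 1"
  else "paragraph"

-- B, expressed on the code-point list.
def pvB (cs : List Char) : String :=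
  let n : Int := (cs.length : Int) - ((cs.dropWhile (· == '#')).length : Int)
  if (1 ≤ n && n ≤ 6) && (n < (cs.length : Int) && PySem.List.pyGet? cs n == some ' ')
  then "heading " ++ PySem.Int.toStr n
  else if ['`', '`', '`'].isPrefixOf cs then "code"
  else if ['>', ' '].isPrefixOf cs then "quote"
  else if ['*', ' '].isPrefixOf cs || ['-', ' '].isPrefixOf cs then "unordered_list"
  else if ['1', '.', ' '].isPrefixOf cs then "ordered_list"
  else "paragraph"

lemma pvA_eq (bl : String) : identify_block_type bl = pvA bl.toList := rfl

lemma pvB_eq (bl : String) : identify_block_type_alt bl = pvB bl.toList := rfl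

lemma pv_core (cs : List Char) : pvA cs = pvB cs := by
  rcases cs with _ | ⟨c0, t⟩
  · decide
  by_cases h0 : '#' = c0
  case neg =>
    have h0' : ¬ c0 = '#' := fun h => h0 h.symm
    by_cases h1 : '1' = c0
    · subst h1; simp [pvA, pvB, List.isPrefixOf, PySem.List.pyGet?, PySem.List.pyIdx?]
    by_cases h2 : '-' = c0
    · subst h2; simp [pvA, pvB, List.isPrefixOf, PySem.List.pyGet?, PySem.List.pyIdx?]
    by_cases h3 : '*' = c0
    · subst h3; simp [pvA, pvB, List.isPrefixOf, PySem.List.pyGet?, PySem.List.pyIdx?]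
    by_cases h4 : '>' = c0
    · subst h4; simp [pvA, pvB, List.isPrefixOf, PySem.List.pyGet?, PySem.List.pyIdx?]
    by_cases h5 : '`' = c0
    · subst h5; simp [pvA, pvB, List.isPrefixOf, PySem.List.pyGet?, PySem.List.pyIdx?]
    simp [pvA, pvB, List.isPrefixOf, PySem.List.pyGet?, PySem.List.pyIdx?, h0, h0', h1, h2, h3, h4, h5]
  case pos =>
    subst h0
    rcases t with _ | ⟨c1, t⟩
    · decide
    by_cases g1 : ' ' = c1
    · subst g1
      simp [pvA, pvB, List.isPrefixOf, PySem.List.pyGet?, PySem.List.pyIdx?]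
      decide
    by_cases h1 : '#' = c1
    case neg =>
      have g1' : ¬ c1 = ' ' := fun h => g1 h.symm
      have h1' : ¬ c1 = '#' := fun h => h1 h.symm
      simp [pvA, pvB, List.isPrefixOf, PySem.List.pyGet?, PySem.List.pyIdx?, g1, g1', h1, h1']
    case pos =>
      subst h1
      rcases t with _ | ⟨c2, t⟩
      · decide
      by_cases g2 : ' ' = c2
      · subst g2
        have e1 : (t.length : Int) + 1 + 1 - (t.length : Int) = 2 := by omega
        have e4 : (2:Int) ≤ (t.length : Int) + 1 + 1 := by omega
        simp [pvA, pvB, List.isPrefixOf, PySem.List.pyGet?, PySem.List.pyIdx?, e1, e4]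
        decide
      by_cases h2 : '#' = c2
      case neg =>
        have g2' : ¬ c2 = ' ' := fun h => g2 h.symm
        have h2' : ¬ c2 = '#' := fun h => h2 h.symm
        have e1 : (t.length : Int) + 1 + 1 - (t.length : Int) = 2 := by omega
        have e4 : (2:Int) ≤ (t.length : Int) + 1 + 1 := by omega
        simp [pvA, pvB, List.isPrefixOf, PySem.List.pyGet?, PySem.List.pyIdx?, g2, g2', h2, h2', e1, e4]
      case pos =>
        subst h2
        rcases t with _ | ⟨c3, t⟩
        · decide
        by_cases g3 : ' ' = c3
        · subst g3
          have e1 : (t.length : Int) + 1 + 1 + 1 - (t.length : Int) = 3 := by omega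
          have e4 : (3:Int) ≤ (t.length : Int) + 1 + 1 + 1 := by omega
          simp [pvA, pvB, List.isPrefixOf, PySem.List.pyGet?, PySem.List.pyIdx?, e1, e4]
          decide
        by_cases h3 : '#' = c3
        case neg =>
          have g3' : ¬ c3 = ' ' := fun h => g3 h.symm
          have h3' : ¬ c3 = '#' := fun h => h3 h.symm
          have e1 : (t.length : Int) + 1 + 1 + 1 - (t.length : Int) = 3 := by omega
          have e4 : (3:Int) ≤ (t.length : Int) + 1 + 1 + 1 := by omega
          simp [pvA, pvB, List.isPrefixOf, PySem.List.pyGet?, PySem.List.pyIdx?, g3, g3', h3, h3', e1, e4]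
        case pos =>
          subst h3
          rcases t with _ | ⟨c4, t⟩
          · decide
          by_cases g4 : ' ' = c4
          · subst g4
            have e1 : (t.length : Int) + 1 + 1 + 1 + 1 - (t.length : Int) = 4 := by omega
            have e4 : (4:Int) ≤ (t.length : Int) + 1 + 1 + 1 + 1 := by omega
            simp [pvA, pvB, List.isPrefixOf, PySem.List.pyGet?, PySem.List.pyIdx?, e1, e4]
            decide
          by_cases h4 : '#' = c4
          case neg =>
            have g4' : ¬ c4 = ' ' := fun h => g4 h.symm
            have h4' : ¬ c4 = '#' := fun h => h4 h.symm
            have e1 : (t.length : Int) + 1 + 1 + 1 + 1 - (t.length : Int) = 4 := by omega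
            have e4 : (4:Int) ≤ (t.length : Int) + 1 + 1 + 1 + 1 := by omega
            simp [pvA, pvB, List.isPrefixOf, PySem.List.pyGet?, PySem.List.pyIdx?, g4, g4', h4, h4', e1, e4]
          case pos =>
            subst h4
            rcases t with _ | ⟨c5, t⟩
            · decide
            by_cases g5 : ' ' = c5
            · subst g5
              have e1 : (t.length : Int) + 1 + 1 + 1 + 1 + 1 - (t.length : Int) = 5 := by omega
              have e4 : (5:Int) ≤ (t.length : Int) + 1 + 1 + 1 + 1 + 1 := by omega
              simp [pvA, pvB, List.isPrefixOf, PySem.List.pyGet?, PySem.List.pyIdx?, e1, e4]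
              decide
            by_cases h5 : '#' = c5
            case neg =>
              have g5' : ¬ c5 = ' ' := fun h => g5 h.symm
              have h5' : ¬ c5 = '#' := fun h => h5 h.symm
              have e1 : (t.length : Int) + 1 + 1 + 1 + 1 + 1 - (t.length : Int) = 5 := by omega
              have e4 : (5:Int) ≤ (t.length : Int) + 1 + 1 + 1 + 1 + 1 := by omega
              simp [pvA, pvB, List.isPrefixOf, PySem.List.pyGet?, PySem.List.pyIdx?, g5, g5', h5, h5', e1, e4]
            case pos =>
              subst h5
              rcases t with _ | ⟨c6, t⟩
              · decide
              by_cases g6 : ' ' = c6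
              · subst g6
                have e1 : (t.length : Int) + 1 + 1 + 1 + 1 + 1 + 1 - (t.length : Int) = 6 := by omega
                have e4 : (6:Int) ≤ (t.length : Int) + 1 + 1 + 1 + 1 + 1 + 1 := by omega
                simp [pvA, pvB, List.isPrefixOf, PySem.List.pyGet?, PySem.List.pyIdx?, e1, e4]
                decide
              by_cases h6 : '#' = c6
              case neg =>
                have g6' : ¬ c6 = ' ' := fun h => g6 h.symm
                have h6' : ¬ c6 = '#' := fun h => h6 h.symm
                have e1 : (t.length : Int) + 1 + 1 + 1 + 1 + 1 + 1 - (t.length : Int) = 6 := by omega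
                have e4 : (6:Int) ≤ (t.length : Int) + 1 + 1 + 1 + 1 + 1 + 1 := by omega
                simp [pvA, pvB, List.isPrefixOf, PySem.List.pyGet?, PySem.List.pyIdx?, g6, g6', h6', e1, e4]
              case pos =>
                subst h6
                have hle := List.length_dropWhile_le (fun c => c == '#') t
                simp [pvA, pvB, List.isPrefixOf, PySem.List.pyGet?, PySem.List.pyIdx?]
                omega

-- ===== VERDICT (by name: the statement is the Claim_ definition above) =====
theorem identify_block_type_spec : Claim_equal_identify_block_type := by
  intro bl _
  unfold Spec_identify_block_type
  rw [pvA_eq, pvB_eq, pv_core]
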